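-- pv_equiv track=rewrite | github.com/Allenator/nais-analysis | scripts/generate_production_data.py | make_secondary_production_table
-- ===== SOURCE A (Python) =====
-- def calc_secondary_output(input_amount: int, effective_ratio: int, output_ratio: int) -> int:
--     """Calculate secondary industry output using integer division (as in NML)."""
--     return input_amount * effective_ratio * output_ratio // 64
--
-- def make_secondary_production_table(
--     input_cargos: list[tuple[str, int]],
--     output_cargos: list[tuple[str, int]],
--     combined_boost: bool,
-- ) -> dict:
--     """Generate production tables for all combinations of input cargo delivery.
--
--     Returns ``{scenario_key: {output_key: amount_per_8_input}}``.
--     """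
--     n = len(input_cargos)
--     scenarios: dict[str, dict[str, int]] = {}
--
--     for mask in range(1, 1 << n):
--         delivered = [i for i in range(n) if mask & (1 << i)]
--         scenario_key = "+".join(input_cargos[i][0] for i in delivered)
--
--         scenario_data: dict[str, int] = {}
--         for i in delivered:
--             cargo_label = input_cargos[i][0]
--             base_ratio = input_cargos[i][1]
--
--             if combined_boost:
--                 boost = sum(input_cargos[j][1] for j in delivered if j != i)
--                 effective_ratio = base_ratio + boost
--             else:
--                 effective_ratio = base_ratio
--
--             for out_label, out_ratio in output_cargos:
--                 output_per_8 = calc_secondary_output(8, effective_ratio, out_ratio)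
--                 key = f"{out_label}_per_8_{cargo_label}"
--                 scenario_data[key] = output_per_8
--
--         scenarios[scenario_key] = scenario_data
--
--     return scenarios
-- ===== SOURCE B (Python) =====
-- def make_secondary_production_table(
--     input_cargos: list[tuple[str, int]],
--     output_cargos: list[tuple[str, int]],
--     combined_boost: bool,
-- ) -> dict:
--     """Generate production tables for all combinations of input cargo delivery.
--
--     Instead of enumerating bitmasks and filtering indices per mask, the list of
--     delivery scenarios is grown by successive doubling: processing one more
--     input cargo appends, to every scenario built so far (including the empty
--     one), the same scenario extended with that cargo, carrying the running sum
--     of delivered ratios along.  This yields exactly the scenarios in increasing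
--     bitmask order, with each delivered list in input order and its ratio total
--     already computed.
--     """
--     states = [([], 0)]  # (delivered cargos, sum of their ratios), in mask order
--     for cargo in input_cargos:
--         states += [(d + [cargo], t + cargo[1]) for d, t in states]
--     scenarios = {}
--     for delivered, total in states[1:]:
--         data = {}
--         for label, base in delivered:
--             eff = total if combined_boost else base
--             for out_label, out_ratio in output_cargos:
--                 data[f"{out_label}_per_8_{label}"] = 8 * eff * out_ratio // 64
--         scenarios["+".join(l for l, _ in delivered)] = data
--     return scenarios
-- ===== Notes on version B (the rewrite author's own statement) =====
-- stated objective: alternative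
-- what changed: B abandons the bitmask loop entirely: it grows the scenario list by successive doubling over the input cargos (each cargo appends a copy of every scenario so far extended with it), carrying each scenario's delivered list and ratio total incrementally, so there is no per-mask index filtering and no per-cargo re-summation; with combined boost the effective ratio is the carried per-scenario total, since base + sum-of-others = sum-of-all.
import Mathlib
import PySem

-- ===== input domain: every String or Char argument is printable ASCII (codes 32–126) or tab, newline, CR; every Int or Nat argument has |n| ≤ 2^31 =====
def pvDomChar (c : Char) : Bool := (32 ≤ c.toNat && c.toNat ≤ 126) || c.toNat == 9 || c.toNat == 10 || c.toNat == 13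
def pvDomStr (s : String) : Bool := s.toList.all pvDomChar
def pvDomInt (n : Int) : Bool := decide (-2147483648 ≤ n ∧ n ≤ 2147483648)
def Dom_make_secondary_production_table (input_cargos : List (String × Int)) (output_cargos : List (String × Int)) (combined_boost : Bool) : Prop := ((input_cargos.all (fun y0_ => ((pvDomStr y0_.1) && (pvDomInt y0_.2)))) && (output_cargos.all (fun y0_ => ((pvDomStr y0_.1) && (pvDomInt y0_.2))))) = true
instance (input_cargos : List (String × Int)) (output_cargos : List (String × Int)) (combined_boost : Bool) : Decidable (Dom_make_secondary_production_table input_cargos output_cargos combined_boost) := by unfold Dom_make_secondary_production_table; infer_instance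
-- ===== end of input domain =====

-- B drops A's bitmask enumeration: it grows the scenario list by successive doubling over the
-- input cargos, carrying each scenario's delivered list and ratio total incrementally (with
-- combined boost, base + sum-of-others = the carried total).

-- ===== PORT A =====
def calc_secondary_output (input_amount : Int) (effective_ratio : Int) (output_ratio : Int) : Int :=
  PySem.Int.floordiv (input_amount * effective_ratio * output_ratio) 64

-- i.toNat in '1 <<< i.toNat' is exact: i ranges over pyRange 0 n, so 0 ≤ i, as in Python's 1 << i
def make_secondary_production_table (input_cargos : List (String × Int)) (output_cargos : List (String × Int)) (combined_boost : Bool) : List (String × List (String × Int)) :=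
  let n := input_cargos.length
  let scenarios : PySem.Dict String (PySem.Dict String Int) :=
    (PySem.List.pyRange 1 ((1 : Int) <<< n) 1).foldl (fun scenarios mask =>
      let delivered := (PySem.List.pyRange 0 (n : Int) 1).filter
        (fun i => PySem.Int.band mask ((1 : Int) <<< i.toNat) != 0)
      let scenario_key := PySem.Str.join "+"
        (delivered.map (fun i => (PySem.List.pyGetD input_cargos i ("", 0)).1))
      let scenario_data : PySem.Dict String Int :=
        delivered.foldl (fun scenario_data i =>
          let cargo_label := (PySem.List.pyGetD input_cargos i ("", 0)).1
          let base_ratio := (PySem.List.pyGetD input_cargos i ("", 0)).2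
          let effective_ratio :=
            if combined_boost then
              base_ratio + ((delivered.filter (fun j => j != i)).map
                (fun j => (PySem.List.pyGetD input_cargos j ("", 0)).2)).sum
            else base_ratio
          output_cargos.foldl (fun scenario_data oc =>
            scenario_data.insert (oc.1 ++ "_per_8_" ++ cargo_label)
              (calc_secondary_output 8 effective_ratio oc.2)) scenario_data)
          PySem.Dict.empty
      scenarios.insert scenario_key scenario_data)
      PySem.Dict.empty
  scenarios.items.map (fun p => (p.1, p.2.items))

-- ===== PORT B =====
-- 'states += [(d + [cargo], t + cargo[1]) for d, t in states]' for each cargo, from [([], 0)]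
def mspStates (input_cargos : List (String × Int)) : List (List (String × Int) × Int) :=
  input_cargos.foldl
    (fun states cargo => states ++ states.map (fun s => (s.1 ++ [cargo], s.2 + cargo.2)))
    [([], 0)]

def make_secondary_production_table_alt (input_cargos : List (String × Int)) (output_cargos : List (String × Int)) (combined_boost : Bool) : List (String × List (String × Int)) :=
  let states := mspStates input_cargos
  let scenarios : PySem.Dict String (PySem.Dict String Int) :=
    (PySem.List.slice states (some 1) none).foldl (fun scenarios s =>
      let data : PySem.Dict String Int :=
        s.1.foldl (fun data c =>
          output_cargos.foldl (fun data oc =>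
            data.insert (oc.1 ++ "_per_8_" ++ c.1)
              (PySem.Int.floordiv (8 * (if combined_boost then s.2 else c.2) * oc.2) 64)) data)
          PySem.Dict.empty
      scenarios.insert (PySem.Str.join "+" (s.1.map (fun c => c.1))) data)
      PySem.Dict.empty
  scenarios.items.map (fun p => (p.1, p.2.items))

-- ===== PRECONDITION & SPEC =====
def Spec_make_secondary_production_table (input_cargos : List (String × Int)) (output_cargos : List (String × Int)) (combined_boost : Bool) (out : List (String × List (String × Int))) : Prop := out = make_secondary_production_table_alt input_cargos output_cargos combined_boost
instance (input_cargos : List (String × Int)) (output_cargos : List (String × Int)) (combined_boost : Bool) (out : List (String × List (String × Int))) : Decidable (Spec_make_secondary_production_table input_cargos output_cargos combined_boost out) := by unfold Spec_make_secondary_production_table; infer_instance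

-- ===== CLAIM (what is proved, stated in full; the proofs are below) =====
def Claim_equal_make_secondary_production_table : Prop := ∀ (input_cargos : List (String × Int)) (output_cargos : List (String × Int)) (combined_boost : Bool), Dom_make_secondary_production_table input_cargos output_cargos combined_boost → Spec_make_secondary_production_table input_cargos output_cargos combined_boost (make_secondary_production_table input_cargos output_cargos combined_boost)

-- ===== LEMMAS AND PROOFS =====

-- the delivered cargos of bitmask m: entries of ic whose index bit is set in m
def delN (ic : List (String × Int)) (m : Nat) : List (String × Int) :=
  ((List.range ic.length).filter (fun i => m.testBit i)).map (fun i => ic.getD i ("", 0))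

theorem delN_append_lt (ic : List (String × Int)) (c : String × Int) (m : Nat)
    (hm : m < 2 ^ ic.length) : delN (ic ++ [c]) m = delN ic m := by
  unfold delN
  rw [List.length_append, List.length_cons, List.length_nil, List.range_succ,
    List.filter_append]
  simp only [List.filter_cons, List.filter_nil, Nat.testBit_lt_two_pow hm,
    Bool.false_eq_true, if_false, List.append_nil]
  apply List.map_congr_left
  intro i hi
  have : i < ic.length := List.mem_range.mp (List.mem_of_mem_filter hi)
  rw [List.getD_append _ _ _ _ this]

theorem delN_append_ge (ic : List (String × Int)) (c : String × Int) (m : Nat)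
    (hm : m < 2 ^ ic.length) :
    delN (ic ++ [c]) (2 ^ ic.length + m) = delN ic m ++ [c] := by
  unfold delN
  rw [List.length_append, List.length_cons, List.length_nil, List.range_succ,
    List.filter_append]
  have hbit : (2 ^ ic.length + m).testBit ic.length = true := by
    rw [Nat.testBit_two_pow_add_eq, Nat.testBit_lt_two_pow hm]; rfl
  simp only [List.filter_cons, List.filter_nil, hbit]
  rw [List.map_append]
  congr 1
  · rw [List.filter_congr (fun i hi => by
      rw [Nat.testBit_two_pow_add_gt (List.mem_range.mp hi) m])]
    apply List.map_congr_left
    intro i hi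
    have : i < ic.length := List.mem_range.mp (List.mem_of_mem_filter hi)
    rw [List.getD_append _ _ _ _ this]
  · simp [List.getD_eq_getElem?_getD]

-- B's doubling loop produces exactly the scenarios of masks 0, 1, …, 2^n − 1 in order
theorem mspStates_eq (ic : List (String × Int)) :
    mspStates ic = (List.range (2 ^ ic.length)).map
      (fun m => (delN ic m, ((delN ic m).map Prod.snd).sum)) := by
  induction ic using List.reverseRecOn with
  | nil => rfl
  | append_singleton ic c ih =>
    unfold mspStates
    rw [List.foldl_append]
    show mspStates ic ++ (mspStates ic).map _ = _
    rw [ih, List.length_append, List.length_cons, List.length_nil, pow_succ, mul_two,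
      List.range_add, List.map_append, List.map_map, List.map_map]
    congr 1
    · apply List.map_congr_left
      intro m hm
      rw [delN_append_lt ic c m (List.mem_range.mp hm)]
    · apply List.map_congr_left
      intro m hm
      have h := delN_append_ge ic c m (List.mem_range.mp hm)
      simp only [Function.comp_apply, h, List.map_append, List.sum_append]
      simp

-- A's bit test on mask m selects exactly the indices set in m
theorem bit_pred (m i : Nat) :
    (PySem.Int.band (m : Int) ((1 : Int) <<< ((i : Nat) : Int)) != 0) = m.testBit i := by
  have h1 : ((1 : Int) <<< ((i : Nat) : Int)) = ((2 ^ i : Nat) : Int) := by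
    rw [Int.one_shiftLeft]
  rw [h1, PySem.Int.band_natCast, Nat.and_two_pow]
  cases h : m.testBit i <;> simp [h]

-- A's delivered index list for mask m, as the casts of the set bits below n
theorem A_del_eq (n m : Nat) :
    (PySem.List.pyRange 0 (n : Int) 1).filter
      (fun i => PySem.Int.band (m : Int) ((1 : Int) <<< i.toNat) != 0)
    = ((List.range n).filter (fun i => m.testBit i)).map (Nat.cast : Nat → Int) := by
  rw [PySem.List.pyRange_zero_natCast, List.filter_map]
  have hfc : ∀ i ∈ List.range n,
      ((fun i : Int => PySem.Int.band (m : Int) ((1 : Int) <<< (i.toNat : Int)) != 0) ∘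
        (fun k : Nat => (k : Int))) i = m.testBit i := by
    intro i _
    simp only [Function.comp_apply, Int.toNat_natCast]
    exact bit_pred m i
  rw [List.filter_congr hfc]

-- splitting one occurrence off the sum over a duplicate-free list
theorem pv_sum_split {l : List Nat} {i : Nat} (hn : l.Nodup) (hi : i ∈ l) (r : Nat → Int) :
    r i + ((l.filter (fun j => j != i)).map r).sum = (l.map r).sum := by
  rw [← List.Nodup.erase_eq_filter hn i]
  have := ((List.perm_cons_erase hi).map r).sum_eq
  simpa using this.symm

-- ===== VERDICT (by name: the statement is the Claim_ definition above) =====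
set_option maxHeartbeats 1000000 in
theorem make_secondary_production_table_spec : Claim_equal_make_secondary_production_table := by
  intro ic oc cb _
  unfold Spec_make_secondary_production_table
  unfold make_secondary_production_table make_secondary_production_table_alt
  simp only []
  congr 1
  congr 1
  -- align the two mask enumerations
  have hshift : ((1 : Int) <<< ic.length) = ((2 ^ ic.length : Nat) : Int) := by
    simp [Int.shiftLeft_eq]
  have hcnt : ((((2 ^ ic.length : Nat) : Int)) - 1).toNat = 2 ^ ic.length - 1 := by omega
  have houter : PySem.List.pyRange 1 ((2 ^ ic.length : Nat) : Int) 1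
      = (List.range (2 ^ ic.length - 1)).map (fun k => ((k + 1 : Nat) : Int)) := by
    rw [PySem.List.pyRange_one, hcnt]
    apply List.map_congr_left
    intro k _
    push_cast
    ring
  have hr : List.range (2 ^ ic.length) = 0 :: (List.range (2 ^ ic.length - 1)).map (· + 1) := by
    have hpow : 0 < 2 ^ ic.length := Nat.two_pow_pos _
    have h2 : 2 ^ ic.length = (2 ^ ic.length - 1) + 1 := by omega
    rw [h2, List.range_succ_eq_map]
    simp
  rw [hshift, houter, mspStates_eq, PySem.List.slice_from_one, hr,
    List.map_cons, List.tail_cons, List.foldl_map, List.map_map, List.foldl_map]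
  apply PySem.List.foldl_congr_mem
  intro acc k _
  simp only [Function.comp_apply]
  set m := k + 1 with hmdef
  have hdel := A_del_eq ic.length m
  rw [hdel]
  set natlist := (List.range ic.length).filter (fun i => m.testBit i) with hnl
  -- keys agree
  have hkey : (natlist.map (Nat.cast : Nat → Int)).map
        (fun i => (PySem.List.pyGetD ic i ("", 0)).1)
      = (delN ic m).map (fun c => c.1) := by
    rw [List.map_map]; unfold delN; rw [List.map_map]
    apply List.map_congr_left
    intro i _
    simp [PySem.List.pyGetD_natCast]
  rw [hkey]
  -- data tables agree
  congr 1
  unfold delN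
  rw [List.foldl_map, List.foldl_map]
  apply PySem.List.foldl_congr_mem
  intro d i hi
  have hget : PySem.List.pyGetD ic (i : Int) ("", 0) = ic.getD i ("", 0) :=
    PySem.List.pyGetD_natCast ic i ("", 0)
  have hnd : natlist.Nodup := (List.nodup_range).filter _
  -- the inner re-summation over the other delivered cargos equals total − base
  have hsum : (((natlist.map (Nat.cast : Nat → Int)).filter (fun j => j != (i : Int))).map
        (fun j => (PySem.List.pyGetD ic j ("", 0)).2)).sum
      = ((natlist.filter (fun j => j != i)).map (fun j => (ic.getD j ("", 0)).2)).sum := by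
    rw [List.filter_map, List.map_map]
    refine congrArg List.sum ?_
    have hfc2 : ∀ j ∈ natlist,
        ((fun j : Int => j != (i : Int)) ∘ (Nat.cast : Nat → Int)) j = (j != i) := by
      intro j _
      cases h : (j == i) <;> simp_all [bne]
    rw [List.filter_congr hfc2]
    apply List.map_congr_left
    intro j _
    simp [Function.comp, PySem.List.pyGetD_natCast]
  have heff : (if cb then
        (PySem.List.pyGetD ic (i : Int) ("", 0)).2 +
          (((natlist.map (Nat.cast : Nat → Int)).filter (fun j => j != (i : Int))).map
            (fun j => (PySem.List.pyGetD ic j ("", 0)).2)).sum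
      else (PySem.List.pyGetD ic (i : Int) ("", 0)).2)
      = (if cb then ((natlist.map (fun j => ic.getD j ("", 0))).map Prod.snd).sum
        else (ic.getD i ("", 0)).2) := by
    cases cb
    · simp [hget]
    · simp only [if_pos trivial, hsum, hget, List.map_map]
      exact pv_sum_split hnd hi (fun j => (ic.getD j ("", 0)).2)
  rw [heff, hget]
  rfl
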